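-- pv_equiv track=rewrite | github.com/avdo403/UnrealMCP | Python/helpers/blueprint_analysis.py | _find_missing_execution_connections
-- ===== SOURCE A (Python) =====
-- from typing import Dict, Any, List, Optional, Set, Tuple
--
-- def _find_missing_execution_connections(
--     nodes: List[Dict], connections: List[Dict]
-- ) -> List[str]:
--     """Find nodes that should have execution connections but don't."""
--     exec_node_keywords = {"Branch", "IfThenElse", "ForLoop", "WhileLoop", "Sequence", "DoOnce"}
--
--     nodes_with_exec_out: Set[str] = set()
--     for conn in connections:
--         sp = conn.get("source_pin", "").lower()
--         if any(kw in sp for kw in ("then", "else", "exec")):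
--             nodes_with_exec_out.add(conn["source_node"])
--
--     return [
--         n["id"] for n in nodes
--         if any(kw in n.get("type", "") for kw in exec_node_keywords)
--         and n["id"] not in nodes_with_exec_out
--     ]
-- ===== SOURCE B (Python) =====
-- def _find_missing_execution_connections(nodes, connections):
--     """Find nodes that should have execution connections but don't.
--
--     Recursive back-to-front construction; no prebuilt set: each flow-control
--     node scans the connections list on demand."""
--     KEYWORDS = ["Branch", "IfThenElse", "ForLoop", "WhileLoop", "Sequence", "DoOnce"]
--     PINS = ["then", "else", "exec"]
--
--     def go(rest):
--         if not rest:
--             return []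
--         n = rest[0]
--         tail = go(rest[1:])
--         if not any(kw in n.get("type", "") for kw in KEYWORDS):
--             return tail
--         nid = n["id"]
--         for c in connections:
--             if c.get("source_node") == nid and any(
--                 p in c.get("source_pin", "").lower() for p in PINS
--             ):
--                 return tail
--         return [nid] + tail
--
--     return go(nodes)
-- ===== Notes on version B (the rewrite author's own statement) =====
-- stated objective: alternative
-- what changed: B drops A's prebuilt set of nodes-with-exec-output: it recurses over the nodes list building the result back-to-front and, for each flow-control node, scans the connections list on demand (keyword tests driven by list iteration instead of A's set/tuple literals).
import Mathlib
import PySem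

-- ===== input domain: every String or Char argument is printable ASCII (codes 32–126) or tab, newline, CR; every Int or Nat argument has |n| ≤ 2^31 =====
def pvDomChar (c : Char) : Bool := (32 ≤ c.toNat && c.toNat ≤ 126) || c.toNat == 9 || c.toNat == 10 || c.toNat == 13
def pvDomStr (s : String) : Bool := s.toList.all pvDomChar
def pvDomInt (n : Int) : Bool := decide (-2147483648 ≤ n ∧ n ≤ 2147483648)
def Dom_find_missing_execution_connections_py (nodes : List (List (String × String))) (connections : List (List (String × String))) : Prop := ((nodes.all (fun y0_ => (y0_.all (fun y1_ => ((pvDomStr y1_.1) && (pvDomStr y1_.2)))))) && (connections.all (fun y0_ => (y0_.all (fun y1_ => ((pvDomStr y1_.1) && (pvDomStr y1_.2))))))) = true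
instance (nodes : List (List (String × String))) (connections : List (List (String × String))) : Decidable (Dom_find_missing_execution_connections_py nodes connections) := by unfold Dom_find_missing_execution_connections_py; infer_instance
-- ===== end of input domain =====

-- B replaces A's prebuilt set of nodes-with-exec-output by a recursive back-to-front
-- construction with an on-demand scan of the connections per flow-control node
-- (alternative decomposition, not faster).


-- ===== PORT A =====
-- conn.get("source_pin", "").lower() contains "then"/"else"/"exec" (A's any over a tuple)
def pvPinOk (conn : List (String × String)) : Bool :=
  let sp := PySem.Str.lower (PySem.Dict.getD (PySem.Dict.mk conn) "source_pin" "")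
  PySem.Str.isIn "then" sp || PySem.Str.isIn "else" sp || PySem.Str.isIn "exec" sp

-- any(kw in n.get("type", "") for kw in exec_node_keywords) (A's any over the set literal)
def pvTypeOk (n : List (String × String)) : Bool :=
  let t := PySem.Dict.getD (PySem.Dict.mk n) "type" ""
  PySem.Str.isIn "Branch" t || PySem.Str.isIn "IfThenElse" t || PySem.Str.isIn "ForLoop" t ||
  PySem.Str.isIn "WhileLoop" t || PySem.Str.isIn "Sequence" t || PySem.Str.isIn "DoOnce" t

-- A's first loop: nodes_with_exec_out.  conn["source_node"] is a KeyError on a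
-- missing key (excluded by Pre_): ported as get? with a "" default fill.
def pvNodesWithExecOut (connections : List (List (String × String))) : PySem.Set String :=
  connections.foldl (fun s conn =>
    if pvPinOk conn then PySem.Set.add s (((PySem.Dict.mk conn).get? "source_node").getD "")
    else s) PySem.Set.empty

-- Port of A: build the set nodes_with_exec_out, then the list comprehension
-- (n["id"] is a KeyError on a missing key, excluded by Pre_; same "" fill).
def find_missing_execution_connections_py (nodes : List (List (String × String))) (connections : List (List (String × String))) : List String :=
  nodes.filterMap (fun n =>
    if pvTypeOk n && !(PySem.Set.contains (pvNodesWithExecOut connections) (((PySem.Dict.mk n).get? "id").getD "")) then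
      some (((PySem.Dict.mk n).get? "id").getD "")
    else none)

-- ===== PORT B =====
-- B's keyword lists (iterated by any(...))
def pvKeywords : List String := ["Branch", "IfThenElse", "ForLoop", "WhileLoop", "Sequence", "DoOnce"]
def pvPins : List String := ["then", "else", "exec"]

-- B: any(kw in n.get("type","") for kw in KEYWORDS), iterating the list
def pvIsFlow (n : List (String × String)) : Bool :=
  pvKeywords.any (fun kw => PySem.Str.isIn kw (PySem.Dict.getD (PySem.Dict.mk n) "type" ""))

-- B's inner for-loop over connections with its compound condition and early return
def pvConnHits (connections : List (List (String × String))) (nid : String) : Bool :=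
  connections.any (fun c =>
    (PySem.Dict.mk c).get? "source_node" == some nid &&
    pvPins.any (fun p => PySem.Str.isIn p (PySem.Str.lower (PySem.Dict.getD (PySem.Dict.mk c) "source_pin" ""))))

-- Port of B: structural recursion go(rest) building the result back-to-front.
def find_missing_execution_connections_py_alt (nodes : List (List (String × String))) (connections : List (List (String × String))) : List String :=
  match nodes with
  | [] => []
  | n :: rest =>
    let tail := find_missing_execution_connections_py_alt rest connections
    if !(pvIsFlow n) then tail
    else
      let nid := ((PySem.Dict.mk n).get? "id").getD ""
      if pvConnHits connections nid then tail
      else nid :: tail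

-- ===== PRECONDITION & SPEC =====
-- Pre_ excludes exactly the inputs on which Python A raises KeyError: a flow-control
-- node without an "id" key, or a connection with an exec-like source_pin but no
-- "source_node" key.
def Pre_find_missing_execution_connections_py (nodes : List (List (String × String))) (connections : List (List (String × String))) : Prop :=
  (∀ c ∈ connections, pvPinOk c = true → (PySem.Dict.mk c).contains "source_node" = true) ∧
  (∀ n ∈ nodes, pvTypeOk n = true → (PySem.Dict.mk n).contains "id" = true)
instance (nodes : List (List (String × String))) (connections : List (List (String × String))) : Decidable (Pre_find_missing_execution_connections_py nodes connections) := by unfold Pre_find_missing_execution_connections_py; infer_instance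

def pvWitness_find_missing_execution_connections_py : (List (List (String × String))) × (List (List (String × String))) :=
  ([[("id", "node7"), ("type", "WhileLoop")], [("type", "Sequence"), ("id", "q")], [("id", "z"), ("type", "DoOnce")]],
   [[("source_pin", "exec_out"), ("source_node", "q")], [("source_node", "z"), ("source_pin", "data")]])

def Spec_find_missing_execution_connections_py (nodes : List (List (String × String))) (connections : List (List (String × String))) (out : List String) : Prop := out = find_missing_execution_connections_py_alt nodes connections
instance (nodes : List (List (String × String))) (connections : List (List (String × String))) (out : List String) : Decidable (Spec_find_missing_execution_connections_py nodes connections out) := by unfold Spec_find_missing_execution_connections_py; infer_instance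

-- ===== CLAIM (what is proved, stated in full; the proofs are below) =====
def Claim_equal_find_missing_execution_connections_py : Prop := ∀ (nodes : List (List (String × String))) (connections : List (List (String × String))), Dom_find_missing_execution_connections_py nodes connections → Pre_find_missing_execution_connections_py nodes connections → Spec_find_missing_execution_connections_py nodes connections (find_missing_execution_connections_py nodes connections)

-- ===== LEMMAS AND PROOFS =====

-- B's list-driven keyword test agrees with A's unrolled one
theorem pv_isFlow_eq_typeOk (n : List (String × String)) : pvIsFlow n = pvTypeOk n := by
  simp [pvIsFlow, pvTypeOk, pvKeywords, List.any, Bool.or_assoc]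

-- B's pin test (any over pvPins) agrees with A's unrolled pvPinOk
theorem pv_pins_eq_pinOk (c : List (String × String)) :
    pvPins.any (fun p => PySem.Str.isIn p (PySem.Str.lower (PySem.Dict.getD (PySem.Dict.mk c) "source_pin" ""))) = pvPinOk c := by
  simp [pvPins, pvPinOk, List.any, Bool.or_assoc]

-- membership in A's fold that conditionally adds to a PySem.Set
theorem pv_mem_foldl_add_if {α β : Type} [BEq β] [LawfulBEq β]
    (l : List α) (p : α → Bool) (f : α → β) (s : PySem.Set β) (y : β) :
    (y ∈ l.foldl (fun s c => if p c then PySem.Set.add s (f c) else s) s) ↔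
      y ∈ s ∨ ∃ c ∈ l, p c = true ∧ y = f c := by
  induction l generalizing s with
  | nil => simp
  | cons c t ih =>
    simp only [List.foldl_cons]
    by_cases h : p c = true
    · rw [if_pos h, ih]
      simp only [PySem.Set.mem_add]
      constructor
      · rintro (⟨hs | hy⟩ | ⟨d, hd, hpd, hy⟩)
        · exact Or.inl hs
        · exact Or.inr ⟨c, List.mem_cons_self .., h, hy⟩
        · exact Or.inr ⟨d, List.mem_cons_of_mem _ hd, hpd, hy⟩
      · rintro (hs | ⟨d, hd, hpd, hy⟩)
        · exact Or.inl (Or.inl hs)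
        · rcases List.mem_cons.mp hd with rfl | hd'
          · exact Or.inl (Or.inr hy)
          · exact Or.inr ⟨d, hd', hpd, hy⟩
    · rw [if_neg h, ih]
      constructor
      · rintro (hs | ⟨d, hd, hpd, hy⟩)
        · exact Or.inl hs
        · exact Or.inr ⟨d, List.mem_cons_of_mem _ hd, hpd, hy⟩
      · rintro (hs | ⟨d, hd, hpd, hy⟩)
        · exact Or.inl hs
        · rcases List.mem_cons.mp hd with rfl | hd'
          · exact absurd hpd h
          · exact Or.inr ⟨d, hd', hpd, hy⟩

-- pvConnHits with its pin test folded back to A's pvPinOk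
theorem pvConnHits_eq (connections : List (List (String × String))) (y : String) :
    pvConnHits connections y
      = connections.any (fun c => (PySem.Dict.mk c).get? "source_node" == some y && pvPinOk c) := by
  simp only [pvConnHits, pv_pins_eq_pinOk]

-- under Pre_'s second conjunct, membership in A's set equals B's connection scan
theorem pv_contains_eq_connHits
    (connections : List (List (String × String)))
    (hpre : ∀ c ∈ connections, pvPinOk c = true → (PySem.Dict.mk c).contains "source_node" = true)
    (y : String) :
    PySem.Set.contains (pvNodesWithExecOut connections) y = pvConnHits connections y := by
  rw [pvConnHits_eq, pvNodesWithExecOut, Bool.eq_iff_iff, PySem.Set.contains_iff, pv_mem_foldl_add_if]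
  simp only [PySem.Set.empty, List.not_mem_nil, false_or, List.any_eq_true, Bool.and_eq_true,
    beq_iff_eq]
  constructor
  · rintro ⟨c, hc, hp, hy⟩
    have := hpre c hc hp
    rw [PySem.Dict.contains_eq_isSome_get?] at this
    cases hg : ((PySem.Dict.mk c).get? "source_node") with
    | none => rw [hg] at this; simp at this
    | some v =>
      refine ⟨c, hc, ?_, hp⟩
      rw [hg] at hy ⊢
      simp only [Option.getD_some] at hy
      rw [hy]
  · rintro ⟨c, hc, hg, hp⟩
    exact ⟨c, hc, hp, by rw [hg]; rfl⟩

-- B's recursion equals A's comprehension, given Pre_'s second conjunct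
theorem pv_alt_eq_filterMap
    (connections : List (List (String × String)))
    (hpre2 : ∀ c ∈ connections, pvPinOk c = true → (PySem.Dict.mk c).contains "source_node" = true)
    (nodes : List (List (String × String))) :
    find_missing_execution_connections_py_alt nodes connections
      = nodes.filterMap (fun n =>
          if pvTypeOk n && !(PySem.Set.contains (pvNodesWithExecOut connections) (((PySem.Dict.mk n).get? "id").getD "")) then
            some (((PySem.Dict.mk n).get? "id").getD "")
          else none) := by
  induction nodes with
  | nil => rfl
  | cons n rest ih =>
    unfold find_missing_execution_connections_py_alt
    simp only [List.filterMap_cons]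
    rw [pv_contains_eq_connHits connections hpre2, pv_isFlow_eq_typeOk, ih]
    by_cases ht : pvTypeOk n = true
    · by_cases he : pvConnHits connections (((PySem.Dict.mk n).get? "id").getD "") = true
      · simp [ht, he]
      · simp only [Bool.not_eq_true] at he
        simp [ht, he]
    · simp only [Bool.not_eq_true] at ht
      simp [ht]

-- ===== VERDICT (by name: the statement is the Claim_ definition above) =====
theorem find_missing_execution_connections_py_spec : Claim_equal_find_missing_execution_connections_py := by
  intro nodes connections _hdom hpre
  unfold Spec_find_missing_execution_connections_py find_missing_execution_connections_py
  rw [pv_alt_eq_filterMap connections hpre.1 nodes]
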